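-- pv_equiv track=rewrite | github.com/edt-yxz-zzd/python3_src | nn_ns/RMQ/backup-2015/range_minimum_query.py | calc_offseted_inblock_query_table
-- ===== SOURCE A (Python) =====
-- debug = 0
--
-- def minidx_of(array, begin, end):
--     subarray = array[begin:end]
--     i = subarray.index(min(subarray))
--     return i + begin
--
-- def calc_offseted_inblock_query_table(array):
--     # O(n^2)
--     n = len(array)
--     table = [[None]*(n+1) for _ in range(n)]
--
--     L = 1
--     for i in range(n):
--         table[i][i+L] = i
--
--     for L in range(2, n+1):
--         for i in range(n-L+1):
--             idx1 = table[i][i+L-1]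
--             idx2 = table[i+1][i+L]
--
--             val1, val2 = array[idx1], array[idx2]
--
--             table[i][i+L] = idx2 if val2 < val1 else idx1
--     assert table[0][n] is not None
--
--     if debug:
--         for i in range(n):
--             for L in range(1, n-i+1):
--                 idx = table[i][i+L]
--                 ans = minidx_of(array, i, i+L)
--                 assert idx == ans
--     return table
-- ===== SOURCE B (Python) =====
-- def calc_offseted_inblock_query_table(array):
--     # O(n^2), one running leftmost-argmin per start index (no length-doubling DP)
--     n = len(array)
--     table = [[None]*(n+1) for _ in range(n)]
--     for i in range(n):
--         best = i
--         for j in range(i, n):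
--             if array[j] < array[best]:
--                 best = j
--             table[i][j+1] = best
--     assert table[0][n] is not None
--     return table
-- ===== Notes on version B (the rewrite author's own statement) =====
-- stated objective: alternative
-- what changed: replaces A's length-increasing DP (combining the argmins of the two overlapping shorter subintervals, table[i][i+L-1] vs table[i+1][i+L]) with a per-start-index scan keeping one running leftmost-argmin and filling row i left to right in a single inner pass
import Mathlib
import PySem

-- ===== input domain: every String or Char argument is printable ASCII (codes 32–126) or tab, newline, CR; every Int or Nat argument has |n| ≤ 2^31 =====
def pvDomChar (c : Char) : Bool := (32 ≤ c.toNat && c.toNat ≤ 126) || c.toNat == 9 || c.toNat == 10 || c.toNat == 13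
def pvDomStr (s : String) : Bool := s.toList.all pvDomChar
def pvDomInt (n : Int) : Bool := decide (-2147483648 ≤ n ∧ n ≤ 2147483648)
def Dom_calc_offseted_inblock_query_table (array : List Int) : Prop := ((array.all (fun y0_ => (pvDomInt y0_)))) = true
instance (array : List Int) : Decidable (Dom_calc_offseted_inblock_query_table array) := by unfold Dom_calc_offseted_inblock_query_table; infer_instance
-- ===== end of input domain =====

-- B replaces A's length-increasing DP with a per-start-index scan keeping one running
-- leftmost-argmin per row (alternative decomposition, same O(n^2) cost).

-- ===== PORT A =====
-- table[i][j] read, as Python's table[i][j] (indices always in range where A reads/writes)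
def pvTget (t : List (List (Option Int))) (i j : Nat) : Option Int :=
  (t.getD i []).getD j none

-- port of A: build n rows of n+1 Nones, fill length-1 entries, then DP over lengths L = 2..n
-- combining table[i][i+L-1] and table[i+1][i+L].  idx.toNat is exact: stored indices are ≥ 0.
-- The trailing `assert table[0][n] is not None` passes for every nonempty array and raises for
-- [] (IndexError on table[0]); Pre_ excludes [].
def calc_offseted_inblock_query_table (array : List Int) : List (List (Option Int)) :=
  let n := array.length
  let t0 := (List.range n).map (fun _ => List.replicate (n+1) (none : Option Int))
  let t1 := (List.range n).foldl (fun t i => t.set i ((t.getD i []).set (i+1) (some (i : Int)))) t0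
  (List.range' 2 (n-1)).foldl (fun t L =>
    (List.range (n - L + 1)).foldl (fun t' i =>
      match pvTget t' i (i+L-1), pvTget t' (i+1) (i+L) with
      | some idx1, some idx2 =>
        let val1 := array.getD idx1.toNat 0
        let val2 := array.getD idx2.toNat 0
        t'.set i ((t'.getD i []).set (i+L) (if val2 < val1 then some idx2 else some idx1))
      | _, _ => t') t) t1

-- ===== PORT B =====
-- port of B: for each start i, one pass j = i..n-1 with a running leftmost-argmin `best`,
-- writing table[i][j+1] = best; same trailing assert (raises on []), Pre_ excludes [].
def calc_offseted_inblock_query_table_alt (array : List Int) : List (List (Option Int)) :=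
  let n := array.length
  let t0 := (List.range n).map (fun _ => List.replicate (n+1) (none : Option Int))
  (List.range n).foldl (fun t i =>
    let res := (List.range' i (n - i)).foldl
      (fun (st : Nat × List (Option Int)) j =>
        let best := if array.getD j 0 < array.getD st.1 0 then j else st.1
        (best, st.2.set (j+1) (some (best : Int))))
      (i, t.getD i [])
    t.set i res.2) t0

-- ===== PRECONDITION & SPEC =====
-- Pre_ excludes only the empty list, on which A raises IndexError at the trailing assert.
def Pre_calc_offseted_inblock_query_table (array : List Int) : Prop := array ≠ []
instance (array : List Int) : Decidable (Pre_calc_offseted_inblock_query_table array) := by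
  unfold Pre_calc_offseted_inblock_query_table; infer_instance

def pvWitness_calc_offseted_inblock_query_table : List Int := [2, 1, 2]

def Spec_calc_offseted_inblock_query_table (array : List Int) (out : List (List (Option Int))) : Prop := out = calc_offseted_inblock_query_table_alt array
instance (array : List Int) (out : List (List (Option Int))) : Decidable (Spec_calc_offseted_inblock_query_table array out) := by unfold Spec_calc_offseted_inblock_query_table; infer_instance

-- ===== CLAIM (what is proved, stated in full; the proofs are below) =====
def Claim_equal_calc_offseted_inblock_query_table : Prop := ∀ (array : List Int), Dom_calc_offseted_inblock_query_table array → Pre_calc_offseted_inblock_query_table array → Spec_calc_offseted_inblock_query_table array (calc_offseted_inblock_query_table array)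

-- ===== LEMMAS AND PROOFS =====

def pvAm (a : List Int) (i : Nat) : Nat → Nat
  | 0 => i
  | L+1 => if a.getD (i+L+1) 0 < a.getD (pvAm a i L) 0 then i+L+1 else pvAm a i L

theorem pvAm_zero (a : List Int) (i : Nat) : pvAm a i 0 = i := rfl

theorem pvAm_succ (a : List Int) (i L : Nat) :
    pvAm a i (L+1) = if a.getD (i+L+1) 0 < a.getD (pvAm a i L) 0 then i+L+1 else pvAm a i L := rfl

theorem pvAm_left (a : List Int) (i : Nat) : ∀ L : Nat,
    pvAm a i (L+1) = if a.getD i 0 ≤ a.getD (pvAm a (i+1) L) 0 then i else pvAm a (i+1) L := by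
  intro L
  induction L with
  | zero =>
    rw [pvAm_succ, pvAm_zero, pvAm_zero]
    have e : i + 0 + 1 = i + 1 := rfl
    rw [e]
    split_ifs <;> omega
  | succ M ih =>
    rw [pvAm_succ a i (M+1), ih, pvAm_succ a (i+1) M]
    have e : i + (M+1) + 1 = i + 1 + M + 1 := by omega
    rw [e]
    split_ifs <;> omega

theorem pvAm_combine (a : List Int) (i : Nat) : ∀ L : Nat,
    (if a.getD (pvAm a (i+1) L) 0 < a.getD (pvAm a i L) 0 then pvAm a (i+1) L else pvAm a i L)
      = pvAm a i (L+1) := by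
  intro L
  cases L with
  | zero =>
    rw [pvAm_succ, pvAm_zero, pvAm_zero]
  | succ M =>
    rw [pvAm_left a i (M+1), pvAm_left a i M, pvAm_succ a (i+1) M]
    split_ifs <;> omega

theorem pv_getD_set {α : Type} (l : List α) (i j : Nat) (v d : α) :
    (l.set i v).getD j d = if i = j ∧ j < l.length then v else l.getD j d := by
  simp only [List.getD, List.getElem?_set]
  split_ifs with h1 h2 h3 h4 <;> simp_all

theorem pv_getD_replicate {α : Type} (n j : Nat) (x d : α) :
    (List.replicate n x).getD j d = if j < n then x else d := by
  simp only [List.getD, List.getElem?_replicate]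
  split_ifs <;> simp_all

theorem pv_getD_map_range {α : Type} (f : Nat → α) (n j : Nat) (d : α) :
    ((List.range n).map f).getD j d = if j < n then f j else d := by
  simp only [List.getD]
  by_cases h : j < n
  · rw [List.getElem?_eq_getElem (by simpa using h)]; simp [h]
  · rw [List.getElem?_eq_none (by simpa using h)]; simp [h]

-- table invariant: entries filled exactly where F holds, with the leftmost argmin
def pvInv (a : List Int) (F : Nat → Nat → Bool) (t : List (List (Option Int))) : Prop :=
  t.length = a.length ∧ ∀ i, i < a.length →
    (t.getD i []).length = a.length + 1 ∧
    ∀ j : Nat, (t.getD i []).getD j none =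
      if j < a.length + 1 ∧ F i j then some ((pvAm a i (j-i-1) : Nat) : Int) else none

theorem pvInv_congr (a : List Int) (F G : Nat → Nat → Bool) (t : List (List (Option Int)))
    (h : pvInv a F t) (hFG : ∀ i j, i < a.length → j < a.length + 1 → F i j = G i j) :
    pvInv a G t := by
  refine ⟨h.1, fun i hi => ⟨(h.2 i hi).1, fun j => ?_⟩⟩
  rw [(h.2 i hi).2 j]
  by_cases hj : j < a.length + 1
  · rw [hFG i j hi hj]
  · simp [hj]

theorem pv_ext_getD {α : Type} (l l' : List α) (d : α) (hl : l.length = l'.length)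
    (h : ∀ j, l.getD j d = l'.getD j d) : l = l' := by
  apply List.ext_getElem hl
  intro j hj hj'
  have hj2 := h j
  rwa [List.getD_eq_getElem l d hj, List.getD_eq_getElem l' d hj'] at hj2

theorem pvInv_ext (a : List Int) (F : Nat → Nat → Bool) (t t' : List (List (Option Int)))
    (h : pvInv a F t) (h' : pvInv a F t') : t = t' := by
  apply pv_ext_getD t t' [] (by rw [h.1, h'.1])
  intro i
  by_cases hi : i < a.length
  · apply pv_ext_getD _ _ none (by rw [(h.2 i hi).1, (h'.2 i hi).1])
    intro j
    rw [(h.2 i hi).2 j, (h'.2 i hi).2 j]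
  · rw [List.getD_eq_default _ _ (by rw [h.1]; omega),
        List.getD_eq_default _ _ (by rw [h'.1]; omega)]

-- named pieces of the two ports (definitionally equal to the port bodies)
def pvT0 (a : List Int) : List (List (Option Int)) :=
  (List.range a.length).map (fun _ => List.replicate (a.length+1) (none : Option Int))

def pvFB (a : List Int) (st : Nat × List (Option Int)) (j : Nat) : Nat × List (Option Int) :=
  let best := if a.getD j 0 < a.getD st.1 0 then j else st.1
  (best, st.2.set (j+1) (some (best : Int)))

def pvStepB (a : List Int) (t : List (List (Option Int))) (i : Nat) : List (List (Option Int)) :=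
  let res := (List.range' i (a.length - i)).foldl (pvFB a) (i, t.getD i [])
  t.set i res.2

theorem calc_B_eq (a : List Int) :
    calc_offseted_inblock_query_table_alt a = (List.range a.length).foldl (pvStepB a) (pvT0 a) := rfl

theorem pvB_inner (a : List Int) (i : Nat) : ∀ m : Nat, i + m ≤ a.length →
    ((List.range' i m).foldl (pvFB a) (i, List.replicate (a.length+1) (none : Option Int))).1
        = pvAm a i (m-1) ∧
    ((List.range' i m).foldl (pvFB a) (i, List.replicate (a.length+1) (none : Option Int))).2.length
        = a.length + 1 ∧
    ∀ j : Nat, ((List.range' i m).foldl (pvFB a) (i, List.replicate (a.length+1) (none : Option Int))).2.getD j none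
        = if j < a.length + 1 ∧ i < j ∧ j ≤ i + m then some ((pvAm a i (j-i-1) : Nat) : Int) else none := by
  intro m
  induction m with
  | zero =>
    intro _
    simp only [List.range'_zero, List.foldl_nil]
    refine ⟨rfl, by simp, fun j => ?_⟩
    rw [pv_getD_replicate]
    split_ifs <;> first | rfl | omega
  | succ M ih =>
    intro hm
    obtain ⟨h1, h2, h3⟩ := ih (by omega)
    rw [List.range'_1_concat, List.foldl_append, List.foldl_cons, List.foldl_nil]
    set res := (List.range' i M).foldl (pvFB a) (i, List.replicate (a.length+1) (none : Option Int)) with hres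
    have hbest : (if a.getD (i+M) 0 < a.getD res.1 0 then i+M else res.1) = pvAm a i M := by
      rw [h1]
      cases M with
      | zero => simp [pvAm]
      | succ K =>
        have e : i + (K+1) = i + K + 1 := rfl
        rw [Nat.succ_sub_one, e, pvAm_succ]
    refine ⟨?_, ?_, ?_⟩
    · show (if a.getD (i+M) 0 < a.getD res.1 0 then i+M else res.1) = pvAm a i (M+1-1)
      rw [Nat.succ_sub_one]; exact hbest
    · show ((res.2).set (i+M+1) _).length = a.length + 1
      rw [List.length_set]; exact h2
    · intro j
      show ((res.2).set (i+M+1) (some ((if a.getD (i+M) 0 < a.getD res.1 0 then i+M else res.1 : Nat) : Int))).getD j none = _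
      rw [hbest, pv_getD_set, h2, h3 j]
      by_cases hj : i+M+1 = j
      · subst hj
        rw [if_pos ⟨rfl, by omega⟩, if_pos ⟨by omega, by omega, le_refl _⟩]
        have e1 : i + M + 1 - i - 1 = M := by omega
        rw [e1]
      · split_ifs <;> first | rfl | omega

theorem pvB_outer (a : List Int) : ∀ k : Nat, k ≤ a.length →
    pvInv a (fun i j => decide (i < j) && decide (i < k))
      ((List.range k).foldl (pvStepB a) (pvT0 a)) := by
  intro k
  induction k with
  | zero =>
    intro _
    rw [List.range_zero, List.foldl_nil]
    refine ⟨by simp [pvT0], fun i hi => ?_⟩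
    have hrow : (pvT0 a).getD i [] = List.replicate (a.length+1) (none : Option Int) := by
      unfold pvT0; rw [pv_getD_map_range]; simp [hi]
    rw [hrow]
    refine ⟨by simp, fun j => ?_⟩
    rw [pv_getD_replicate]
    split_ifs <;> simp_all
  | succ K ih =>
    intro hk
    have hK : K < a.length := by omega
    obtain ⟨hlen, hrows⟩ := ih (by omega)
    rw [List.range_succ, List.foldl_append, List.foldl_cons, List.foldl_nil]
    set t := (List.range K).foldl (pvStepB a) (pvT0 a) with ht
    have hrowK : t.getD K [] = List.replicate (a.length+1) (none : Option Int) := by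
      apply pv_ext_getD _ _ none (by rw [(hrows K hK).1]; simp)
      intro j
      rw [(hrows K hK).2 j, pv_getD_replicate]
      split_ifs <;> simp_all
    obtain ⟨g1, g2, g3⟩ := pvB_inner a K (a.length - K) (by omega)
    show pvInv a _ (pvStepB a t K)
    unfold pvStepB
    rw [hrowK]
    refine ⟨by rw [List.length_set]; exact hlen, fun i hi => ?_⟩
    rw [pv_getD_set (d := [])]
    by_cases hiK : K = i
    · subst hiK
      have : (K = K ∧ K < t.length) := ⟨rfl, by omega⟩
      rw [if_pos this]
      refine ⟨g2, fun j => ?_⟩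
      rw [g3 j]
      have e : K + (a.length - K) = a.length := by omega
      rw [e]
      split_ifs <;> simp only [Bool.and_eq_true, decide_eq_true_eq] at * <;>
        first | rfl | (exfalso; omega)
    · rw [if_neg (by tauto)]
      refine ⟨(hrows i hi).1, fun j => ?_⟩
      rw [(hrows i hi).2 j]
      split_ifs <;> simp only [Bool.and_eq_true, decide_eq_true_eq] at * <;>
        first | rfl | (exfalso; omega)

theorem calc_B_inv (a : List Int) :
    pvInv a (fun i j => decide (i < j)) (calc_offseted_inblock_query_table_alt a) := by
  rw [calc_B_eq]
  apply pvInv_congr a _ _ _ (pvB_outer a a.length le_rfl)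
  intro i j hi hj
  simp [hi]

-- named pieces of port A
def pvStep1 (_a : List Int) (t : List (List (Option Int))) (i : Nat) : List (List (Option Int)) :=
  t.set i ((t.getD i []).set (i+1) (some (i : Int)))

def pvStepA (a : List Int) (L : Nat) (t' : List (List (Option Int))) (i : Nat) : List (List (Option Int)) :=
  match pvTget t' i (i+L-1), pvTget t' (i+1) (i+L) with
  | some idx1, some idx2 =>
    let val1 := a.getD idx1.toNat 0
    let val2 := a.getD idx2.toNat 0
    t'.set i ((t'.getD i []).set (i+L) (if val2 < val1 then some idx2 else some idx1))
  | _, _ => t'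

def pvBodyA (a : List Int) (t : List (List (Option Int))) (L : Nat) : List (List (Option Int)) :=
  (List.range (a.length - L + 1)).foldl (pvStepA a L) t

theorem calc_A_eq (a : List Int) :
    calc_offseted_inblock_query_table a =
      (List.range' 2 (a.length - 1)).foldl (pvBodyA a)
        ((List.range a.length).foldl (pvStep1 a) (pvT0 a)) := rfl

theorem pvA_loop1 (a : List Int) : ∀ k : Nat, k ≤ a.length →
    pvInv a (fun i j => decide (j = i+1) && decide (i < k))
      ((List.range k).foldl (pvStep1 a) (pvT0 a)) := by
  intro k
  induction k with
  | zero =>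
    intro _
    rw [List.range_zero, List.foldl_nil]
    refine ⟨by simp [pvT0], fun i hi => ?_⟩
    have hrow : (pvT0 a).getD i [] = List.replicate (a.length+1) (none : Option Int) := by
      unfold pvT0; rw [pv_getD_map_range]; simp [hi]
    rw [hrow]
    refine ⟨by simp, fun j => ?_⟩
    rw [pv_getD_replicate]
    split_ifs <;> simp_all
  | succ K ih =>
    intro hk
    have hK : K < a.length := by omega
    obtain ⟨hlen, hrows⟩ := ih (by omega)
    rw [List.range_succ, List.foldl_append, List.foldl_cons, List.foldl_nil]
    set t := (List.range K).foldl (pvStep1 a) (pvT0 a) with ht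
    show pvInv a _ (pvStep1 a t K)
    unfold pvStep1
    refine ⟨by rw [List.length_set]; exact hlen, fun i hi => ?_⟩
    rw [pv_getD_set (d := [])]
    by_cases hiK : K = i
    · subst hiK
      rw [if_pos ⟨rfl, by omega⟩]
      refine ⟨by rw [List.length_set]; exact (hrows K hK).1, fun j => ?_⟩
      rw [pv_getD_set, (hrows K hK).1, (hrows K hK).2 j]
      by_cases hj : K+1 = j
      · have e : j - K - 1 = 0 := by omega
        rw [e]
        split_ifs <;> simp only [Bool.and_eq_true, decide_eq_true_eq] at * <;>
          first | rfl | (exfalso; omega)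
      · split_ifs <;> simp only [Bool.and_eq_true, decide_eq_true_eq] at * <;>
          first | rfl | (exfalso; omega)
    · rw [if_neg (by tauto)]
      refine ⟨(hrows i hi).1, fun j => ?_⟩
      rw [(hrows i hi).2 j]
      split_ifs <;> simp only [Bool.and_eq_true, decide_eq_true_eq] at * <;>
        first | rfl | (exfalso; omega)

theorem pvA_inner (a : List Int) (L : Nat) (hL2 : 2 ≤ L) (hLn : L ≤ a.length)
    (t : List (List (Option Int)))
    (ht : pvInv a (fun i j => decide (i < j) && decide (j ≤ i + (L-1))) t) :
    ∀ k : Nat, k ≤ a.length - L + 1 →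
    pvInv a (fun i j => decide (i < j) &&
        (decide (j ≤ i + (L-1)) || (decide (j = i + L) && decide (i < k))))
      ((List.range k).foldl (pvStepA a L) t) := by
  intro k
  induction k with
  | zero =>
    intro _
    rw [List.range_zero, List.foldl_nil]
    apply pvInv_congr a _ _ _ ht
    intro i j _ _
    simp
  | succ K ih =>
    intro hk
    have hKL : K + L ≤ a.length := by omega
    have hK : K < a.length := by omega
    have hK1 : K + 1 < a.length := by omega
    obtain ⟨hlen, hrows⟩ := ih (by omega)
    rw [List.range_succ, List.foldl_append, List.foldl_cons, List.foldl_nil]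
    set t' := (List.range K).foldl (pvStepA a L) t with ht'
    have hr1 : pvTget t' K (K+L-1) = some ((pvAm a K (L-2) : Nat) : Int) := by
      unfold pvTget
      rw [(hrows K hK).2 (K+L-1)]
      rw [if_pos ⟨by omega, by simp; omega⟩]
      rw [show K+L-1-K-1 = L-2 from by omega]
    have hr2 : pvTget t' (K+1) (K+L) = some ((pvAm a (K+1) (L-2) : Nat) : Int) := by
      unfold pvTget
      rw [(hrows (K+1) hK1).2 (K+L)]
      rw [if_pos ⟨by omega, by simp; omega⟩]
      rw [show K+L-(K+1)-1 = L-2 from by omega]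
    have hstep : pvStepA a L t' K =
        t'.set K ((t'.getD K []).set (K+L) (some ((pvAm a K (L-1) : Nat) : Int))) := by
      unfold pvStepA
      rw [hr1, hr2]
      show t'.set K ((t'.getD K []).set (K+L)
          (if a.getD ((pvAm a (K+1) (L-2) : Nat) : Int).toNat 0 <
                a.getD ((pvAm a K (L-2) : Nat) : Int).toNat 0
            then some ((pvAm a (K+1) (L-2) : Nat) : Int)
            else some ((pvAm a K (L-2) : Nat) : Int))) = _
      rw [Int.toNat_natCast, Int.toNat_natCast]
      rw [← apply_ite (fun x : Nat => some ((x : Nat) : Int))]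
      have hc := pvAm_combine a K (L-2)
      rw [show L-2+1 = L-1 from by omega] at hc
      rw [hc]
    rw [hstep]
    refine ⟨by rw [List.length_set]; exact hlen, fun i hi => ?_⟩
    rw [pv_getD_set (d := [])]
    by_cases hiK : K = i
    · subst hiK
      rw [if_pos ⟨rfl, by omega⟩]
      refine ⟨by rw [List.length_set]; exact (hrows K hK).1, fun j => ?_⟩
      rw [pv_getD_set, (hrows K hK).1, (hrows K hK).2 j]
      by_cases hj : K+L = j
      · have e : j - K - 1 = L - 1 := by omega
        rw [e]
        split_ifs <;> simp only [Bool.and_eq_true, Bool.or_eq_true, decide_eq_true_eq] at * <;>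
          first | rfl | (exfalso; omega)
      · split_ifs <;> simp only [Bool.and_eq_true, Bool.or_eq_true, decide_eq_true_eq] at * <;>
          first | rfl | (exfalso; omega)
    · rw [if_neg (by tauto)]
      refine ⟨(hrows i hi).1, fun j => ?_⟩
      rw [(hrows i hi).2 j]
      split_ifs <;> simp only [Bool.and_eq_true, Bool.or_eq_true, decide_eq_true_eq] at * <;>
        first | rfl | (exfalso; omega)

theorem pvA_outer (a : List Int) (h1 : 1 ≤ a.length) : ∀ m : Nat, m ≤ a.length - 1 →
    pvInv a (fun i j => decide (i < j) && decide (j ≤ i + (m+1)))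
      ((List.range' 2 m).foldl (pvBodyA a)
        ((List.range a.length).foldl (pvStep1 a) (pvT0 a))) := by
  intro m
  induction m with
  | zero =>
    intro _
    rw [List.range'_zero, List.foldl_nil]
    apply pvInv_congr a _ _ _ (pvA_loop1 a a.length le_rfl)
    intro i j hi hj
    simp only [← Bool.decide_and]
    rw [decide_eq_decide]
    omega
  | succ M ih =>
    intro hm
    rw [List.range'_1_concat, List.foldl_append, List.foldl_cons, List.foldl_nil]
    have hinv := ih (by omega)
    have hinv' : pvInv a (fun i j => decide (i < j) && decide (j ≤ i + ((2+M)-1)))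
        ((List.range' 2 M).foldl (pvBodyA a)
          ((List.range a.length).foldl (pvStep1 a) (pvT0 a))) := by
      apply pvInv_congr a _ _ _ hinv
      intro i j _ _
      rw [show (2+M)-1 = M+1 from by omega]
    have h2 := pvA_inner a (2+M) (by omega) (by omega) _ hinv' (a.length - (2+M) + 1) le_rfl
    show pvInv a _ (pvBodyA a _ (2+M))
    unfold pvBodyA
    apply pvInv_congr a _ _ _ h2
    intro i j hi hj
    simp only [← Bool.decide_and, ← Bool.decide_or]
    rw [decide_eq_decide]
    omega

theorem calc_A_inv (a : List Int) (h : a ≠ []) :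
    pvInv a (fun i j => decide (i < j)) (calc_offseted_inblock_query_table a) := by
  have h1 : 1 ≤ a.length := by
    cases a with
    | nil => exact absurd rfl h
    | cons x xs => simp
  rw [calc_A_eq]
  have h2 := pvA_outer a h1 (a.length - 1) le_rfl
  rw [show a.length - 1 + 1 = a.length from by omega] at h2
  apply pvInv_congr a _ _ _ h2
  intro i j hi hj
  simp only [← Bool.decide_and]
  rw [decide_eq_decide]
  omega


-- ===== VERDICT (by name: the statement is the Claim_ definition above) =====
theorem calc_offseted_inblock_query_table_spec : Claim_equal_calc_offseted_inblock_query_table := by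
  intro array _ hpre
  unfold Spec_calc_offseted_inblock_query_table
  exact pvInv_ext array _ _ _ (calc_A_inv array hpre) (calc_B_inv array)
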